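-- pv_equiv track=rewrite | github.com/tomtang110/comp9021 | assignment/ass1/z5103095@unsw.edu.au.files的副本 3/nonredundant.py | kaishi
-- ===== SOURCE A (Python) =====
-- from collections import deque
--
-- def kaishi(each,aim1_list):
--     total_list=[]
--     first_es = sorted(aim1_list,key=lambda x:x[0]==each,reverse=True)
--     count =0
--     for k in first_es:
--         if each == k[0]:
--             count+=1
--     last_list = deque(first_es[count:])
--     front_list = first_es[:count]
--     for each_element in front_list:
--         last_list.appendleft(each_element)
--         total_list.append(list(last_list))
--         last_list.popleft()
--     return total_list
-- ===== SOURCE B (Python) =====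
-- def kaishi(each, aim1_list):
--     matches = [k for k in aim1_list if k[0] == each]
--     rest = [k for k in aim1_list if k[0] != each]
--     return [[m] + rest for m in matches]
-- ===== Notes on version B (the rewrite author's own statement) =====
-- stated objective: simpler
-- what changed: Replaced the stable boolean-key sort, the explicit count loop, the slicing and the deque appendleft/popleft loop with one filter-based partition (matches/rest, both keeping original order) and a direct [[m]+rest for m in matches] comprehension.
import Mathlib
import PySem

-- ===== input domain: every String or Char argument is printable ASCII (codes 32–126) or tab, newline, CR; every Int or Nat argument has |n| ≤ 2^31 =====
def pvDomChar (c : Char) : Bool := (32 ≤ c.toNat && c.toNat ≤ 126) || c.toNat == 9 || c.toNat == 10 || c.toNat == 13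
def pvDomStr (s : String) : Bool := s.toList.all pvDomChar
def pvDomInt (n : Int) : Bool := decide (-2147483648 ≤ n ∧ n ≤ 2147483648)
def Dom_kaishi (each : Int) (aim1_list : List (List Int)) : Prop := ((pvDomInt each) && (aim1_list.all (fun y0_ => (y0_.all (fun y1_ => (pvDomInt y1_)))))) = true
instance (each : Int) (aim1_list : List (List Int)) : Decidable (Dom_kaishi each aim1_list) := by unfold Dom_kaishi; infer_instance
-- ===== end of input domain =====

-- B replaces A's stable boolean-key sort + count loop + deque appendleft/popleft loop by a
-- filter-based partition (matches/rest in original order) and a direct map; objective: simpler.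


-- ===== PORT A =====
-- k[0] is ported as PySem.List.pyGetD k 0 0: on empty inner lists Python raises IndexError,
-- and exactly those inputs are excluded by Pre_kaishi below.
def kaishi (each : Int) (aim1_list : List (List Int)) : List (List (List Int)) :=
  -- first_es = sorted(aim1_list, key=lambda x: x[0]==each, reverse=True)
  let first_es := PySem.List.sorted aim1_list (fun x => PySem.List.pyGetD x 0 0 == each) true
  -- count = 0; for k in first_es: if each == k[0]: count += 1
  let count : Int := first_es.foldl (fun c k => if each == PySem.List.pyGetD k 0 0 then c + 1 else c) 0
  -- last_list = deque(first_es[count:]); front_list = first_es[:count]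
  let last_list := PySem.List.slice first_es (some count) none
  let front_list := PySem.List.slice first_es none (some count)
  -- for each_element in front_list: appendleft; append(list(last_list)); popleft
  (front_list.foldl (fun st each_element =>
      let dq := each_element :: st.1
      (dq.drop 1, st.2 ++ [dq])) (last_list, ([] : List (List (List Int))))).2

-- ===== PORT B =====
def kaishi_alt (each : Int) (aim1_list : List (List Int)) : List (List (List Int)) :=
  let matched := aim1_list.filter (fun k => PySem.List.pyGetD k 0 0 == each)
  let rest := aim1_list.filter (fun k => !(PySem.List.pyGetD k 0 0 == each))
  matched.map (fun m => m :: rest)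

-- ===== PRECONDITION & SPEC =====
-- Pre_ excludes lists containing an empty inner list, on which Python A (and B) raise IndexError at k[0].
def Pre_kaishi (each : Int) (aim1_list : List (List Int)) : Prop := ∀ k ∈ aim1_list, k ≠ []
instance (each : Int) (aim1_list : List (List Int)) : Decidable (Pre_kaishi each aim1_list) := by unfold Pre_kaishi; infer_instance
def pvWitness_kaishi : Int × List (List Int) := (1, [[1, 2], [3], [1]])

def Spec_kaishi (each : Int) (aim1_list : List (List Int)) (out : List (List (List Int))) : Prop := out = kaishi_alt each aim1_list
instance (each : Int) (aim1_list : List (List Int)) (out : List (List (List Int))) : Decidable (Spec_kaishi each aim1_list out) := by unfold Spec_kaishi; infer_instance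

-- ===== CLAIM (what is proved, stated in full; the proofs are below) =====
def Claim_equal_kaishi : Prop := ∀ (each : Int) (aim1_list : List (List Int)), Dom_kaishi each aim1_list → Pre_kaishi each aim1_list → Spec_kaishi each aim1_list (kaishi each aim1_list)

-- ===== LEMMAS AND PROOFS =====

-- an element whose key is false is inserted at the end (reverse=True, boolean key)
theorem ins_key_false {α : Type} (key : α → Bool) (x : α) (hx : key x = false) (L : List α) :
    PySem.List.insertBy (fun a b => decide (key b < key a)) x L = L ++ [x] :=
  PySem.List.insertBy_of_forall_not_before _ _ _ (fun y _ => by rw [hx]; cases key y <;> decide)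

-- an element whose key is true is inserted between the true-block and the false-block
theorem ins_key_true {α : Type} (key : α → Bool) (x : α) (hx : key x = true) :
    ∀ (T F : List α), (∀ t ∈ T, key t = true) → (∀ f ∈ F, key f = false) →
      PySem.List.insertBy (fun a b => decide (key b < key a)) x (T ++ F) = T ++ x :: F := by
  intro T
  induction T with
  | nil =>
    intro F _ hF
    cases F with
    | nil => simp [PySem.List.insertBy]
    | cons f fs => simp [PySem.List.insertBy, hF f (by simp), hx]
  | cons t T ih =>
    intro F hT hF
    have ht : key t = true := hT t (by simp)
    simp [PySem.List.insertBy, ht, hx, ih F (fun a ha => hT a (by simp [ha])) hF]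

-- the insertion-sort fold with a boolean key partitions: true-block then false-block, each in order
theorem foldl_ins_partition {α : Type} (key : α → Bool) :
    ∀ (xs T F : List α), (∀ t ∈ T, key t = true) → (∀ f ∈ F, key f = false) →
      xs.foldl (fun acc x => PySem.List.insertBy (fun a b => decide (key b < key a)) x acc) (T ++ F)
        = (T ++ xs.filter key) ++ (F ++ xs.filter (fun a => !key a)) := by
  intro xs
  induction xs with
  | nil => intro T F _ _; simp
  | cons x xs ih =>
    intro T F hT hF
    cases hx : key x with
    | true =>
      have h1 : PySem.List.insertBy (fun a b => decide (key b < key a)) x (T ++ F) = (T ++ [x]) ++ F := by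
        rw [ins_key_true key x hx T F hT hF]; simp
      have h2 := ih (T ++ [x]) F
        (fun t ht => by rcases List.mem_append.1 ht with h | h; exact hT t h; simp at h; simpa [h] using hx) hF
      simp only [List.foldl_cons, h1, h2, List.filter_cons, hx]
      simp
    | false =>
      have h1 : PySem.List.insertBy (fun a b => decide (key b < key a)) x (T ++ F) = T ++ (F ++ [x]) := by
        rw [ins_key_false key x hx]; simp
      have h2 := ih T (F ++ [x]) hT
        (fun f hf => by rcases List.mem_append.1 hf with h | h; exact hF f h; simp at h; simpa [h] using hx)
      simp only [List.foldl_cons, h1, h2, List.filter_cons, hx]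
      simp

-- sorted(xs, key=<bool>, reverse=True) is the stable partition: trues first, then falses
theorem sorted_rev_bool_partition {α : Type} (key : α → Bool) (xs : List α) :
    PySem.List.sorted xs key true = xs.filter key ++ xs.filter (fun a => !key a) := by
  rw [PySem.List.sorted_rev_eq_foldl_insertBy]
  simpa using foldl_ins_partition key xs [] [] (by simp) (by simp)

-- the deque loop: prepend each element of M to R, collecting the snapshots
theorem foldl_deque_loop (R : List (List Int)) :
    ∀ (M : List (List Int)) (acc : List (List (List Int))),
      (M.foldl (fun st e =>
          let dq := e :: st.1
          (dq.drop 1, st.2 ++ [dq])) (R, acc)).2 = acc ++ M.map (fun e => e :: R) := by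
  intro M
  induction M with
  | nil => intro acc; simp
  | cons m M ih =>
    intro acc
    rw [List.foldl_cons]
    exact (ih (acc ++ [m :: R])).trans (by simp)

theorem kaishi_eq (each : Int) (aim1_list : List (List Int)) :
    kaishi each aim1_list = kaishi_alt each aim1_list := by
  unfold kaishi kaishi_alt
  set key : List Int → Bool := fun x => PySem.List.pyGetD x 0 0 == each with hkey
  set M := aim1_list.filter key with hM
  set R := aim1_list.filter (fun a => !key a) with hR
  have hsort : PySem.List.sorted aim1_list key true = M ++ R := sorted_rev_bool_partition key aim1_list
  have hcnt : (M ++ R).foldl (fun c k => if each == PySem.List.pyGetD k 0 0 then c + 1 else c) (0 : Int)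
      = (M.length : Int) := by
    rw [PySem.List.foldl_count_if (fun k => each == PySem.List.pyGetD k 0 0) (M ++ R) 0]
    have hpq : ∀ k ∈ M ++ R, ((each == PySem.List.pyGetD k 0 0) = true ↔ key k = true) := by
      intro k _; simp only [hkey, beq_iff_eq]; exact eq_comm
    rw [List.countP_congr hpq, List.countP_append]
    have h1 : List.countP key M = M.length :=
      List.countP_eq_length.2 (fun a ha => List.of_mem_filter (hM ▸ ha))
    have h2 : List.countP key R = 0 :=
      List.countP_eq_zero.2 (fun a ha => by
        have := List.of_mem_filter (hR ▸ ha); simpa using this)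
    rw [h1, h2]; simp
  simp only [hsort, hcnt]
  rw [PySem.List.slice_from_natCast (M ++ R) M.length, PySem.List.slice_to_natCast (M ++ R) M.length,
    List.drop_left, List.take_left]
  rw [foldl_deque_loop R M []]
  simp

-- ===== VERDICT (by name: the statement is the Claim_ definition above) =====
theorem kaishi_spec : Claim_equal_kaishi := by
  intro each aim1_list _ _
  exact kaishi_eq each aim1_list
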